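-- pv_equiv track=rewrite | github.com/ElGarash/isnad | scripts/map_data.py | filter_hadiths_by_source
-- ===== SOURCE A (Python) =====
-- def filter_hadiths_by_source(hadiths, source):
--     # Strip leading/trailing spaces from column names and values
--     filtered_hadiths = []
--     for h in hadiths:
--         # Ensure the 'source' column exists and strip spaces
--         if "source" in h:
--             h_source = h["source"].strip()
--             if h_source == source:
--                 filtered_hadiths.append(h)
--         else:
--             raise KeyError("The 'source' column is missing in the Hadiths file.")
--     return filtered_hadiths
-- ===== SOURCE B (Python) =====
-- def filter_hadiths_by_source(hadiths, source):
--     # Validation pass first, then a single comprehension for the filtering.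
--     if any("source" not in h for h in hadiths):
--         raise KeyError("The 'source' column is missing in the Hadiths file.")
--     return [h for h in hadiths if h["source"].strip() == source]
-- ===== Notes on version B (the rewrite author's own statement) =====
-- stated objective: simpler
-- what changed: B separates the missing-key validation into a whole-list pass and then filters with a single comprehension, instead of A's one loop with an embedded existence branch and an explicit accumulator.
import Mathlib
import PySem

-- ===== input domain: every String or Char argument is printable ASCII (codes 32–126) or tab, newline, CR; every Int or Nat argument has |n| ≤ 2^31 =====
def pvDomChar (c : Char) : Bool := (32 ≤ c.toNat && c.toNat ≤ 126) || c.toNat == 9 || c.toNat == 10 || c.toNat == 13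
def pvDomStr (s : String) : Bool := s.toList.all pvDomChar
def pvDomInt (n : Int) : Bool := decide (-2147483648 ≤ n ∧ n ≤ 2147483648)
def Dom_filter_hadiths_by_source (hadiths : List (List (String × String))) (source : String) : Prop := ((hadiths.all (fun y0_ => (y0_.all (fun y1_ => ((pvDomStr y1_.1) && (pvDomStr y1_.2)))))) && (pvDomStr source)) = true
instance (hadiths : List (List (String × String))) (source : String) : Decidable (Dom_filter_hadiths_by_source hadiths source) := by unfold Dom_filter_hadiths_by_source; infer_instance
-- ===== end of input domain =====

-- B separates missing-key validation into one pass and filters with a comprehension; equivalence on inputs where every hadith has a 'source' key ('simpler' decomposition, same cost).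


-- ===== PORT A =====
-- A's loop: explicit accumulator; a dict without the "source" key raises KeyError in
-- Python (the `none` branch below; such inputs are excluded by Pre_).
def fhbsLoopA (source : String) : List (List (String × String)) → List (List (String × String)) → List (List (String × String))
  | [], acc => acc
  | h :: t, acc =>
      match h.find? (fun p => p.1 == "source") with
      | some p =>
          if PySem.Str.strip p.2 == source then fhbsLoopA source t (acc ++ [h])
          else fhbsLoopA source t acc
      | none => acc    -- raise KeyError: unreachable under Pre_

def filter_hadiths_by_source (hadiths : List (List (String × String))) (source : String) : List (List (String × String)) :=
  fhbsLoopA source hadiths []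

-- ===== PORT B =====
-- B: validation pass (any dict missing "source" ⇒ KeyError, excluded by Pre_), then one filter.
def filter_hadiths_by_source_alt (hadiths : List (List (String × String))) (source : String) : List (List (String × String)) :=
  if hadiths.any (fun h => !(h.any (fun p => p.1 == "source"))) then
    []    -- raise KeyError: unreachable under Pre_
  else
    hadiths.filter (fun h => PySem.Str.strip (((h.find? (fun p => p.1 == "source")).map Prod.snd).getD "") == source)

-- ===== PRECONDITION & SPEC =====
-- Pre_ excludes exactly the inputs on which A raises KeyError: some hadith has no "source" key.
def Pre_filter_hadiths_by_source (hadiths : List (List (String × String))) (source : String) : Prop :=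
  hadiths.all (fun h => h.any (fun p => p.1 == "source")) = true
instance (hadiths : List (List (String × String))) (source : String) : Decidable (Pre_filter_hadiths_by_source hadiths source) := by unfold Pre_filter_hadiths_by_source; infer_instance

def pvWitness_filter_hadiths_by_source : (List (List (String × String))) × String :=
  ([[("source", " x "), ("text", "t1")], [("source", "y")]], "x")

def Spec_filter_hadiths_by_source (hadiths : List (List (String × String))) (source : String) (out : List (List (String × String))) : Prop := out = filter_hadiths_by_source_alt hadiths source
instance (hadiths : List (List (String × String))) (source : String) (out : List (List (String × String))) : Decidable (Spec_filter_hadiths_by_source hadiths source out) := by unfold Spec_filter_hadiths_by_source; infer_instance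

-- ===== CLAIM (what is proved, stated in full; the proofs are below) =====
def Claim_equal_filter_hadiths_by_source : Prop := ∀ (hadiths : List (List (String × String))) (source : String), Dom_filter_hadiths_by_source hadiths source → Pre_filter_hadiths_by_source hadiths source → Spec_filter_hadiths_by_source hadiths source (filter_hadiths_by_source hadiths source)

-- ===== LEMMAS AND PROOFS =====

theorem fhbsLoopA_eq_filter (source : String) (hadiths : List (List (String × String)))
    (acc : List (List (String × String)))
    (hpre : hadiths.all (fun h => h.any (fun p => p.1 == "source")) = true) :
    fhbsLoopA source hadiths acc
      = acc ++ hadiths.filter (fun h => PySem.Str.strip (((h.find? (fun p => p.1 == "source")).map Prod.snd).getD "") == source) := by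
  induction hadiths generalizing acc with
  | nil => simp [fhbsLoopA]
  | cons h t ih =>
    simp only [List.all_cons, Bool.and_eq_true] at hpre
    obtain ⟨hh, ht⟩ := hpre
    have hfind : (h.find? (fun p => p.1 == "source")).isSome := by
      rw [List.find?_isSome]
      simpa [List.any_eq_true] using hh
    obtain ⟨p, hp⟩ := Option.isSome_iff_exists.mp hfind
    rw [fhbsLoopA, hp]
    by_cases hc : PySem.Str.strip p.2 == source
    · simp [hc, ih _ ht, hp]
    · simp only [if_neg hc]
      rw [ih _ ht, List.filter_cons]
      simp [hp, hc]

theorem filter_hadiths_by_source_spec : Claim_equal_filter_hadiths_by_source := by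
  intro hadiths source _ hpre
  unfold Spec_filter_hadiths_by_source filter_hadiths_by_source filter_hadiths_by_source_alt
  have hnone : hadiths.any (fun h => !(h.any (fun p => p.1 == "source"))) = false := by
    simp only [Pre_filter_hadiths_by_source] at hpre
    simp only [List.any_eq_false]
    intro h hmem
    simpa using (List.all_eq_true.mp hpre h hmem)
  rw [hnone]
  simpa using fhbsLoopA_eq_filter source hadiths [] hpre
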